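-- pv_equiv track=rewrite | github.com/darkspock/languageBenchmarks | v2/test.py | find_tables_for_guests
-- ===== SOURCE A (Python) =====
-- NUM_TABLES = 100
--
-- MAX_CAPACITY_PER_TABLE = 4
--
-- def combined_capacity(num_tables):
--     return num_tables * MAX_CAPACITY_PER_TABLE - (num_tables - 1) * 2
--
-- def find_tables_for_guests(guest_count, tables):
--     for n in range(1, NUM_TABLES + 1):
--         cap = combined_capacity(n)
--         if cap >= guest_count:
--             free_tables = [i for i, t in enumerate(tables) if not t["occupied"]]
--             if len(free_tables) >= n:
--                 return free_tables[:n]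
--     return None
-- ===== SOURCE B (Python) =====
-- NUM_TABLES = 100
--
-- def find_tables_for_guests(guest_count, tables):
--     # smallest n >= 1 with combined capacity 2*n + 2 >= guest_count, closed form
--     n0 = max(1, -((2 - guest_count) // 2))
--     if n0 > NUM_TABLES:
--         return None
--     free_tables = [i for i, t in enumerate(tables) if not t["occupied"]]
--     return free_tables[:n0] if len(free_tables) >= n0 else None
-- ===== Notes on version B (the rewrite author's own statement) =====
-- stated objective: simpler
-- what changed: Replaced the linear scan over n in 1..100 (which recomputed the free-table list on every iteration once capacity sufficed) with a closed-form computation of the smallest sufficient table count n0 = max(1, ceil((guest_count-2)/2)) and a single free-table pass.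
import Mathlib
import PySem

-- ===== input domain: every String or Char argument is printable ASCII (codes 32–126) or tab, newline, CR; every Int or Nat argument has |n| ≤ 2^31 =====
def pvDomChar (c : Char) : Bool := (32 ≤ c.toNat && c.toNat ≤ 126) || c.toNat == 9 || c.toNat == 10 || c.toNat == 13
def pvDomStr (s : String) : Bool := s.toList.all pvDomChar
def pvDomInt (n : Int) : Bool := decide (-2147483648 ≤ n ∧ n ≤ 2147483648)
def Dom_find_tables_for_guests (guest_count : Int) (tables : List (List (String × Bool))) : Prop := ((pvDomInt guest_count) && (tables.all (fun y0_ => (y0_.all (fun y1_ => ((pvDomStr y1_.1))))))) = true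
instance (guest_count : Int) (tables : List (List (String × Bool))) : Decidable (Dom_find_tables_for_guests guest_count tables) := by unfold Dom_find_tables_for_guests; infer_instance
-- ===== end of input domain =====

-- B replaces A's linear scan over n in 1..100 with a closed-form smallest-n computation
-- and a single free-table pass (objective: simpler).


-- ===== PORT A =====
def combined_capacity (num_tables : Int) : Int :=
  num_tables * 4 - (num_tables - 1) * 2

-- [i for i, t in enumerate(tables) if not t["occupied"]]
-- (t["occupied"] is a KeyError when the key is missing; Pre_ excludes that, .getD false is never read)
def pvFreeA (tables : List (List (String × Bool))) : List Int :=
  ((PySem.List.enumerate tables 0).filter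
    (fun p => !((PySem.Dict.get? (PySem.Dict.mk p.2) "occupied").getD false))).map (fun p => p.1)

-- the 'for n in range(1, NUM_TABLES + 1)' loop, over the remaining range
def ftgLoopA (guest_count : Int) (tables : List (List (String × Bool))) : List Int → Option (List Int)
  | [] => none
  | n :: rest =>
      let cap := combined_capacity n
      if cap ≥ guest_count then
        let free_tables := pvFreeA tables
        if (free_tables.length : Int) ≥ n then
          some (PySem.List.slice free_tables none (some n))
        else ftgLoopA guest_count tables rest
      else ftgLoopA guest_count tables rest

def find_tables_for_guests (guest_count : Int) (tables : List (List (String × Bool))) : Option (List Int) :=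
  ftgLoopA guest_count tables (PySem.List.pyRange 1 101 1)

-- ===== PORT B =====
def pvFreeB (tables : List (List (String × Bool))) : List Int :=
  ((PySem.List.enumerate tables 0).filter
    (fun p => !((PySem.Dict.get? (PySem.Dict.mk p.2) "occupied").getD false))).map (fun p => p.1)

def find_tables_for_guests_alt (guest_count : Int) (tables : List (List (String × Bool))) : Option (List Int) :=
  let n0 := max 1 (-(PySem.Int.floordiv (2 - guest_count) 2))
  if n0 > 100 then none
  else
    let free_tables := pvFreeB tables
    if (free_tables.length : Int) ≥ n0 then
      some (PySem.List.slice free_tables none (some n0))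
    else none

-- ===== PRECONDITION & SPEC =====
-- Pre_ excludes exactly the inputs where Python raises KeyError: some table lacks the key
-- "occupied" and the key is actually looked up (which happens iff guest_count ≤ 202).
def Pre_find_tables_for_guests (guest_count : Int) (tables : List (List (String × Bool))) : Prop :=
  guest_count > 202 ∨ ∀ t ∈ tables, "occupied" ∈ t.map Prod.fst
instance (guest_count : Int) (tables : List (List (String × Bool))) : Decidable (Pre_find_tables_for_guests guest_count tables) := by unfold Pre_find_tables_for_guests; infer_instance

def pvWitness_find_tables_for_guests : Int × (List (List (String × Bool))) :=
  (4, [[("occupied", false)], [("occupied", true)], [("occupied", false)]])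

def Spec_find_tables_for_guests (guest_count : Int) (tables : List (List (String × Bool))) (out : Option (List Int)) : Prop := out = find_tables_for_guests_alt guest_count tables
instance (guest_count : Int) (tables : List (List (String × Bool))) (out : Option (List Int)) : Decidable (Spec_find_tables_for_guests guest_count tables out) := by unfold Spec_find_tables_for_guests; infer_instance

-- ===== CLAIM (what is proved, stated in full; the proofs are below) =====
def Claim_equal_find_tables_for_guests : Prop := ∀ (guest_count : Int) (tables : List (List (String × Bool))), Dom_find_tables_for_guests guest_count tables → Pre_find_tables_for_guests guest_count tables → Spec_find_tables_for_guests guest_count tables (find_tables_for_guests guest_count tables)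

-- ===== LEMMAS AND PROOFS =====

theorem pvFree_eq (tables : List (List (String × Bool))) : pvFreeA tables = pvFreeB tables := rfl

-- skip lemma: iterations whose capacity test fails are skipped
theorem ftgLoopA_skip (g : Int) (tables : List (List (String × Bool))) (l l' : List Int)
    (h : ∀ n ∈ l, ¬(combined_capacity n ≥ g)) :
    ftgLoopA g tables (l ++ l') = ftgLoopA g tables l' := by
  induction l with
  | nil => simp
  | cons n rest ih =>
    simp only [List.cons_append, ftgLoopA]
    rw [if_neg (h n (List.mem_cons_self))]
    exact ih (fun m hm => h m (List.mem_cons_of_mem _ hm))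

-- none lemma: once every remaining n exceeds the number of free tables, the loop returns none
theorem ftgLoopA_none (g : Int) (tables : List (List (String × Bool))) (l : List Int)
    (h : ∀ n ∈ l, ((pvFreeA tables).length : Int) < n) :
    ftgLoopA g tables l = none := by
  induction l with
  | nil => rfl
  | cons n rest ih =>
    simp only [ftgLoopA]
    have hn := h n List.mem_cons_self
    have ih' := ih (fun m hm => h m (List.mem_cons_of_mem _ hm))
    split_ifs with h1 h2
    · omega
    · exact ih'
    · exact ih'

theorem cap_ge_iff (g n : Int) (hn : 1 ≤ n) :
    combined_capacity n ≥ g ↔ n ≥ max 1 (-(PySem.Int.floordiv (2 - g) 2)) := by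
  unfold combined_capacity
  rw [PySem.Int.floordiv_eq_ediv_of_pos (by omega)]
  omega

-- ===== VERDICT (by name: the statement is the Claim_ definition above) =====
theorem find_tables_for_guests_spec : Claim_equal_find_tables_for_guests := by
  intro g tables _ _
  unfold Spec_find_tables_for_guests find_tables_for_guests find_tables_for_guests_alt
  set n0 := max 1 (-(PySem.Int.floordiv (2 - g) 2)) with hn0
  have hn0ge : 1 ≤ n0 := le_max_left _ _
  by_cases hbig : n0 > 100
  · -- every n in 1..100 fails the capacity test
    rw [if_pos hbig]
    have : ftgLoopA g tables (PySem.List.pyRange 1 101 1 ++ []) = ftgLoopA g tables [] := by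
      apply ftgLoopA_skip
      intro n hn
      rw [PySem.List.mem_pyRange_one] at hn
      rw [cap_ge_iff g n hn.1, ← hn0]
      omega
    simpa using this
  · rw [if_neg hbig]
    push Not at hbig
    have hsplit : PySem.List.pyRange 1 101 1
        = PySem.List.pyRange 1 n0 1 ++ PySem.List.pyRange n0 101 1 :=
      PySem.List.pyRange_one_append 1 n0 101 (by omega) (by omega)
    rw [hsplit, ftgLoopA_skip g tables _ _ (by
      intro n hn
      rw [PySem.List.mem_pyRange_one] at hn
      rw [cap_ge_iff g n hn.1, ← hn0]
      omega)]
    rw [PySem.List.pyRange_one_cons (by omega : n0 < 101)]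
    simp only [ftgLoopA]
    rw [if_pos ((cap_ge_iff g n0 hn0ge).2 (by omega))]
    by_cases hlen : ((pvFreeA tables).length : Int) ≥ n0
    · rw [if_pos hlen, pvFree_eq, if_pos (by rw [← pvFree_eq]; exact hlen)]
    · rw [if_neg hlen, if_neg (by rw [← pvFree_eq]; exact hlen)]
      apply ftgLoopA_none
      intro n hn
      rw [PySem.List.mem_pyRange_one] at hn
      omega
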